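-- pv_equiv track=rewrite | github.com/jack-chaudier/stark | scripts/unique_minimal_referee.py | q_state
-- ===== SOURCE A (Python) =====
-- from typing import Dict, Iterable, List, Optional, Sequence, Set, Tuple
--
-- BOT = -1
--
-- def q_state(word: Sequence[str], witnesses: Sequence[int], k: int) -> Tuple[int, Tuple[int, ...]]:
--     d = 0
--     seen: Set[int] = set()
--     coords = {w: BOT for w in witnesses}
--     for token in word:
--         if token == "N":
--             d = min(k, d + 1)
--             continue
--         if token.startswith("W"):
--             d = min(k, d + 1)
--             seen.add(int(token[1:]))
--             continue
--         if token == "T":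
--             for w in seen:
--                 coords[w] = max(coords[w], d)
--             break
--     return d, tuple(coords[w] for w in witnesses)
-- ===== SOURCE B (Python) =====
-- BOT = -1
--
-- def q_state(word, witnesses, k):
--     # tokens before the first "T", and whether a "T" occurs
--     prefix = []
--     found = False
--     for t in word:
--         if t == "T":
--             found = True
--             break
--         prefix.append(t)
--     d = min(k, sum(1 for t in prefix if t == "N" or t.startswith("W")))
--     seen = {int(t[1:]) for t in prefix if t.startswith("W")}
--     return d, tuple(d if found and w in seen else BOT for w in witnesses)
-- ===== Notes on version B (the rewrite author's own statement) =====
-- stated objective: simpler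
-- what changed: B replaces A's single stateful scan (incremental capped counter, growing seen-set, dict mutated at the break) by a split at the first "T" followed by closed forms: d = min(k, count of pre-T N/W tokens), a set comprehension for seen, and a direct per-witness expression instead of a mutated dict; Pre_ restricts to the natural domain of a nonnegative cap k (negative k is a degenerate cap on which A's value 0 for an empty count is an implementation accident) and excludes the inputs on which A raises (unparsable W-token, or a seen witness missing from the coords dict when a T occurs).
-- outside the precondition, e.g. on q_state([], [], -1): A returns (0, ()), B returns (-1, ())
import Mathlib
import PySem

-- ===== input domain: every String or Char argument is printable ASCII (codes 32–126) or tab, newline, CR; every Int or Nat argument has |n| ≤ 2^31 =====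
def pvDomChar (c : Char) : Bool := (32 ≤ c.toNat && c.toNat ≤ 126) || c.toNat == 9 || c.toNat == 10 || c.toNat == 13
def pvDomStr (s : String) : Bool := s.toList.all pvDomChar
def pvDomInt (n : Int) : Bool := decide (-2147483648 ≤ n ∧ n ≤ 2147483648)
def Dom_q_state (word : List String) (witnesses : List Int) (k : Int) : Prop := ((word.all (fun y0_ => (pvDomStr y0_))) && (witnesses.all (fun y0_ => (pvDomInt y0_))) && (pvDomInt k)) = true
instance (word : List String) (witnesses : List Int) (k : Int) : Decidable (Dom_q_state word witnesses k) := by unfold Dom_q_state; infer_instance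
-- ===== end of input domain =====

-- B splits at the first "T" and uses closed forms (capped count for d, a set
-- comprehension, a per-witness expression instead of a mutated dict); equivalence is
-- about the return value on Pre_ (nonnegative cap k, and inputs where A raises excluded).

-- ===== PORT A =====
-- int(token[1:]) modeled by (PySem.Int.ofStr? …).getD 0 — total form, exact under Pre_
-- (none = ValueError, excluded by Pre_); coords[w] read modeled by getD BOT — exact
-- under Pre_ (absent key = KeyError, excluded by Pre_).
def qALoop (k : Int) : List String → Int → PySem.Set Int → PySem.Dict Int Int → Int × PySem.Dict Int Int
  | [], d, _seen, coords => (d, coords)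
  | t :: rest, d, seen, coords =>
    if t == "N" then
      qALoop k rest (min k (d + 1)) seen coords
    else if PySem.Str.startswith t "W" then
      qALoop k rest (min k (d + 1))
        (PySem.Set.add seen ((PySem.Int.ofStr? (PySem.Str.slice t (some 1) none)).getD 0)) coords
    else if t == "T" then
      (d, seen.foldl (fun c w => c.insert w (max (c.getD w (-1)) d)) coords)
    else
      qALoop k rest d seen coords

def q_state (word : List String) (witnesses : List Int) (k : Int) : Int × List Int :=
  let coords0 : PySem.Dict Int Int := witnesses.foldl (fun c w => c.insert w (-1)) PySem.Dict.empty
  let r := qALoop k word 0 PySem.Set.empty coords0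
  (r.1, witnesses.map (fun w => r.2.getD w (-1)))

-- ===== PORT B =====
-- collect the tokens before the first "T", with a found flag
def qSplitT : List String → List String × Bool
  | [] => ([], false)
  | t :: rest =>
    if t == "T" then ([], true)
    else
      let r := qSplitT rest
      (t :: r.1, r.2)

def qParse (t : String) : Int := (PySem.Int.ofStr? (PySem.Str.slice t (some 1) none)).getD 0

def q_state_alt (word : List String) (witnesses : List Int) (k : Int) : Int × List Int :=
  let s := qSplitT word
  let d : Int := min k ((s.1.countP (fun t => t == "N" || PySem.Str.startswith t "W") : Nat) : Int)
  let seen : PySem.Set Int :=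
    PySem.Set.ofList ((s.1.filter (fun t => PySem.Str.startswith t "W")).map qParse)
  (d, witnesses.map (fun w => if s.2 && PySem.Set.contains seen w then d else -1))

-- ===== PRECONDITION & SPEC =====
-- Pre_ restricts k to the natural domain of a nonnegative saturation cap (a negative cap
-- is degenerate and A's value there — 0 when no N/W token precedes the first "T" even
-- though 0 > k — is an accident of its incremental clamping), and excludes exactly the
-- inputs on which the Python A raises: a token before the first "T" starting with "W"
-- whose remainder is not int()-parsable (ValueError), or — when a "T" occurs — one
-- whose parsed number is not among the witnesses (KeyError).
def Pre_q_state (word : List String) (witnesses : List Int) (k : Int) : Prop :=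
  0 ≤ k ∧
  ∀ t ∈ word.takeWhile (fun s => !(s == "T")), PySem.Str.startswith t "W" = true →
    (PySem.Int.ofStr? (PySem.Str.slice t (some 1) none)).isSome = true ∧
    ("T" ∈ word → ∀ v ∈ (PySem.Int.ofStr? (PySem.Str.slice t (some 1) none)).toList, v ∈ witnesses)
instance (word : List String) (witnesses : List Int) (k : Int) : Decidable (Pre_q_state word witnesses k) := by
  unfold Pre_q_state; infer_instance

def pvWitness_q_state : List String × List Int × Int := (["N", "W5", "T", "X"], [5, 7], 3)

def Spec_q_state (word : List String) (witnesses : List Int) (k : Int) (out : Int × List Int) : Prop := out = q_state_alt word witnesses k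
instance (word : List String) (witnesses : List Int) (k : Int) (out : Int × List Int) : Decidable (Spec_q_state word witnesses k out) := by unfold Spec_q_state; infer_instance

-- ===== CLAIM (what is proved, stated in full; the proofs are below) =====
def Claim_equal_q_state : Prop := ∀ (word : List String) (witnesses : List Int) (k : Int), Dom_q_state word witnesses k → Pre_q_state word witnesses k → Spec_q_state word witnesses k (q_state word witnesses k)

-- ===== LEMMAS AND PROOFS =====

def qBump (k d : Int) : Nat → Int
  | 0 => d
  | n + 1 => qBump k (min k (d + 1)) n

def qPre (word : List String) : List String := word.takeWhile (fun s => !(s == "T"))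

def qTok (t : String) : Bool := t == "N" || PySem.Str.startswith t "W"

def qCnt (word : List String) : Nat := (qPre word).countP qTok

def qVals (word : List String) : List Int := ((qPre word).filter (fun t => PySem.Str.startswith t "W")).map qParse

def qAssign (coords : PySem.Dict Int Int) (S : List Int) (d : Int) : PySem.Dict Int Int :=
  S.foldl (fun c w => c.insert w (max (c.getD w (-1)) d)) coords

lemma qBump_eq (k d : Int) (n : Nat) : qBump k d n = if n = 0 then d else min k (d + n) := by
  induction n generalizing d with
  | zero => rfl
  | succ m ih =>
    simp only [qBump, ih]
    by_cases h : m = 0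
    · subst h; push_cast; simp
    · rw [if_neg h, if_neg (Nat.succ_ne_zero m)]
      push_cast
      omega

lemma startswith_W_ne_T {t : String} (h : PySem.Str.startswith t "W" = true) : (t == "T") = false := by
  cases hb : (t == "T") with
  | false => rfl
  | true =>
    have := eq_of_beq hb
    subst this
    exact absurd h (by decide)

lemma qPre_cons_of_ne {t : String} (rest : List String) (h : (t == "T") = false) :
    qPre (t :: rest) = t :: qPre rest := by
  simp [qPre, List.takeWhile_cons, h]

lemma qContains_cons_of_ne {t : String} (rest : List String) (h : (t == "T") = false) :
    (t :: rest).contains "T" = rest.contains "T" := by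
  have ht : ("T" == t) = false := by
    cases hb : ("T" == t) with
    | false => rfl
    | true => rw [← eq_of_beq hb] at h; simp at h
  rw [List.contains_cons, ht, Bool.false_or]

lemma qALoop_spec (k : Int) (word : List String) (d : Int) (seen : PySem.Set Int) (coords : PySem.Dict Int Int) :
    qALoop k word d seen coords =
      (qBump k d (qCnt word),
        if word.contains "T" then
          qAssign coords (PySem.Set.update seen (qVals word)) (qBump k d (qCnt word))
        else coords) := by
  induction word generalizing d seen with
  | nil => rfl
  | cons t rest ih =>
    by_cases hN : (t == "N") = true
    · have ht : t = "N" := eq_of_beq hN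
      subst ht
      have hne : (("N" : String) == "T") = false := by decide
      have e1 := qPre_cons_of_ne (t := "N") rest hne
      have e2 : qCnt ("N" :: rest) = qCnt rest + 1 := by
        simp [qCnt, e1, List.countP_cons, qTok]
      have e3 : qVals ("N" :: rest) = qVals rest := by
        have hsw : PySem.Chars.startswith ['N'] ['W'] = false := by decide
        simp [qVals, e1, List.filter_cons, hsw]
      have e4 := qContains_cons_of_ne (t := "N") rest hne
      simp only [qALoop]
      rw [if_pos hN, ih, e2, e3, e4]
      rfl
    · by_cases hW : PySem.Str.startswith t "W" = true
      · have hne := startswith_W_ne_T hW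
        have hW' : PySem.Chars.startswith t.toList ['W'] = true := by simpa using hW
        have e1 := qPre_cons_of_ne (t := t) rest hne
        have e2 : qCnt (t :: rest) = qCnt rest + 1 := by
          simp [qCnt, e1, List.countP_cons, qTok, hW']
        have e3 : qVals (t :: rest) = qParse t :: qVals rest := by
          simp [qVals, e1, List.filter_cons, hW']
        have e4 := qContains_cons_of_ne (t := t) rest hne
        simp only [qALoop]
        rw [if_neg hN, if_pos hW, ih, e2, e3, e4]
        have hupd : PySem.Set.update (PySem.Set.add seen (qParse t)) (qVals rest)
            = PySem.Set.update seen (qParse t :: qVals rest) := rfl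
        rw [← hupd]
        rfl
      · by_cases hT : (t == "T") = true
        · have ht : t = "T" := eq_of_beq hT
          subst ht
          have e1 : qPre ("T" :: rest) = [] := by simp [qPre, List.takeWhile_cons]
          have e2 : qCnt ("T" :: rest) = 0 := by simp [qCnt, e1]
          have e3 : qVals ("T" :: rest) = [] := by simp [qVals, e1]
          have e4 : ("T" :: rest).contains "T" = true := by
            rw [List.contains_cons]; simp
          simp only [qALoop]
          rw [if_neg hN, if_neg hW, if_pos hT, e2, e3, e4]
          have : PySem.Set.update seen ([] : List Int) = seen := rfl
          simp [this, qBump, qAssign]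
        · have hW' : PySem.Chars.startswith t.toList ['W'] = false := by
            simpa using hW
          have hTf : (t == "T") = false := by simpa using hT
          have e1 := qPre_cons_of_ne (t := t) rest hTf
          have e2 : qCnt (t :: rest) = qCnt rest := by
            simp [qCnt, e1, List.countP_cons, qTok, hN, hW']
          have e3 : qVals (t :: rest) = qVals rest := by
            simp [qVals, e1, List.filter_cons, hW']
          have e4 := qContains_cons_of_ne (t := t) rest hTf
          simp only [qALoop]
          rw [if_neg hN, if_neg hW, if_neg hT, ih, e2, e3, e4]

lemma qSplitT_eq (word : List String) : qSplitT word = (qPre word, word.contains "T") := by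
  induction word with
  | nil => simp [qSplitT, qPre]
  | cons t rest ih =>
    by_cases hT : (t == "T") = true
    · have := eq_of_beq hT; subst this
      simp [qSplitT, qPre, List.takeWhile_cons, List.contains_cons]
    · have hTf : (t == "T") = false := by simpa using hT
      rw [qPre_cons_of_ne rest hTf, qContains_cons_of_ne rest hTf]
      simp [qSplitT, hTf, ih]

lemma coords0_getD (witnesses : List Int) (w : Int) :
    (witnesses.foldl (fun c v => c.insert v (-1)) PySem.Dict.empty).getD w (-1) = -1 := by
  suffices h : ∀ (d : PySem.Dict Int Int), (∀ x : Int, d.getD x (-1) = -1) →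
      ∀ x : Int, (witnesses.foldl (fun c v => c.insert v (-1)) d).getD x (-1) = -1 by
    exact h PySem.Dict.empty (fun _ => rfl) w
  induction witnesses with
  | nil => intro d hd x; exact hd x
  | cons v rest ih =>
    intro d hd x
    simp only [List.foldl_cons]
    apply ih
    intro y
    rw [PySem.Dict.getD_insert]
    split_ifs with h
    · rfl
    · exact hd y

lemma qAssign_getD (S : List Int) (hS : S.Nodup) (coords : PySem.Dict Int Int) (d : Int) (w : Int) :
    (qAssign coords S d).getD w (-1) =
      if w ∈ S then max (coords.getD w (-1)) d else coords.getD w (-1) := by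
  induction S generalizing coords with
  | nil => simp [qAssign]
  | cons s rest ih =>
    have hnd : rest.Nodup := hS.of_cons
    have hs : s ∉ rest := by simp at hS; exact hS.1
    simp only [qAssign, List.foldl_cons]
    rw [show (rest.foldl (fun c w => c.insert w (max (c.getD w (-1)) d))
        (coords.insert s (max (coords.getD s (-1)) d))) = qAssign (coords.insert s (max (coords.getD s (-1)) d)) rest d from rfl]
    rw [ih hnd]
    by_cases hw : w = s
    · subst hw
      simp [hs, PySem.Dict.getD_insert]
    · have hbe : (w == s) = false := by simp [hw]
      simp [PySem.Dict.getD_insert, hbe, List.mem_cons, hw]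

lemma q_state_alt_eq (word : List String) (witnesses : List Int) (k : Int) :
    q_state_alt word witnesses k =
      (min k (qCnt word : Int),
        witnesses.map (fun w =>
          if word.contains "T" && PySem.Set.contains (PySem.Set.ofList (qVals word)) w
          then min k (qCnt word : Int) else -1)) := by
  simp only [q_state_alt]
  rw [qSplitT_eq]
  rfl

lemma q_state_eq (word : List String) (witnesses : List Int) (k : Int) :
    q_state word witnesses k =
      (qBump k 0 (qCnt word),
        witnesses.map (fun w =>
          if word.contains "T" then
            if w ∈ PySem.Set.ofList (qVals word) then max (-1) (qBump k 0 (qCnt word)) else -1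
          else -1)) := by
  simp only [q_state]
  rw [qALoop_spec]
  simp only []
  refine congrArg _ ?_
  apply List.map_congr_left
  intro w _hw
  by_cases hT : word.contains "T"
  · rw [if_pos hT, if_pos hT]
    have hupd : PySem.Set.update PySem.Set.empty (qVals word) = PySem.Set.ofList (qVals word) := rfl
    rw [hupd, qAssign_getD _ (PySem.Set.nodup_ofList _), coords0_getD]
  · rw [if_neg hT, if_neg hT, coords0_getD]

-- ===== VERDICT (by name: the statement is the Claim_ definition above) =====
theorem q_state_spec : Claim_equal_q_state := by
  intro word witnesses k _hdom hpre
  obtain ⟨hk, -⟩ := hpre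
  unfold Spec_q_state
  rw [q_state_eq, q_state_alt_eq]
  have hd : qBump k 0 (qCnt word) = min k (qCnt word : Int) := by
    rw [qBump_eq]
    split_ifs with h
    · rw [h]; push_cast; omega
    · ring_nf
  have hmax : max (-1) (min k ((qCnt word : Int))) = min k ((qCnt word : Int)) := by
    have : (0 : Int) ≤ (qCnt word : Int) := Int.natCast_nonneg _
    omega
  rw [hd]
  refine congrArg _ ?_
  apply List.map_congr_left
  intro w _hw
  by_cases hT : word.contains "T"
  · rw [hT]
    by_cases hm : w ∈ PySem.Set.ofList (qVals word)
    · have hc : PySem.Set.contains (PySem.Set.ofList (qVals word)) w = true := by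
        simpa [PySem.Set.contains_iff] using hm
      simp [hm, hc, hmax]
    · have hc : PySem.Set.contains (PySem.Set.ofList (qVals word)) w = false := by
        rw [Bool.eq_false_iff]
        intro hc
        exact hm (by simpa [PySem.Set.contains_iff] using hc)
      simp [hm, hc]
  · have hf : word.contains "T" = false := by simpa using hT
    rw [hf]
    simp
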